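-- pv_equiv track=rewrite | github.com/BrigtHaavardstun/Interactive | pythonServer/server.py | _evaluate_old
-- ===== SOURCE A (Python) =====
-- TARGET_DIFF_VALUE = 75
--
-- def _evaluate_old(ds):
--     diff = [0]*len(ds)
--     for i in range(0, len(ds)):
--         min_curr = min([ds[j][i] for j in range(0, len(ds))])
--         max_curr = max([ds[j][i] for j in range(0, len(ds))])
--
--         diff[i] = abs(max_curr - min_curr)
--
--     diff_sum = sum(diff)
--     small_error = 3
--     return diff_sum <= (TARGET_DIFF_VALUE + small_error)
-- ===== SOURCE B (Python) =====
-- TARGET_DIFF_VALUE = 75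
--
--
-- def _evaluate_old(ds):
--     # One row-major pass keeping per-column running minima/maxima.
--     n = len(ds)
--     if n == 0:
--         return True
--     lo = [ds[0][i] for i in range(n)]
--     hi = lo[:]
--     for r in range(1, n):
--         row = ds[r]
--         for i in range(n):
--             v = row[i]
--             if v < lo[i]:
--                 lo[i] = v
--             if v > hi[i]:
--                 hi[i] = v
--     return sum(hi[i] - lo[i] for i in range(n)) <= TARGET_DIFF_VALUE + 3
-- ===== Notes on version B (the rewrite author's own statement) =====
-- stated objective: alternative
-- what changed: Replaces A's column-major pass (building a fresh column list and scanning it twice with min and max for every column index) by a single row-major sweep that keeps per-column running minima and maxima, then compares the summed spreads to the threshold.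
import Mathlib
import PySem

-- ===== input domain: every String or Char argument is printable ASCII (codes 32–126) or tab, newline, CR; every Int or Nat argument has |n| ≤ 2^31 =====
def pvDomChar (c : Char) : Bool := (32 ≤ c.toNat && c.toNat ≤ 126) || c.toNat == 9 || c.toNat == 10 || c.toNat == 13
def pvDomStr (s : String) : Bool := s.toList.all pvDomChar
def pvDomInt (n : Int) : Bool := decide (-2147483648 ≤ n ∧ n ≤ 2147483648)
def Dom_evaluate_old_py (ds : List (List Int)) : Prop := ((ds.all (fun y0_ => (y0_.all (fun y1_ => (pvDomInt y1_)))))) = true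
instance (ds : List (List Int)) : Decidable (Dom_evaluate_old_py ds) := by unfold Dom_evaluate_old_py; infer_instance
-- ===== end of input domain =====

-- B replaces A's column-major pass (a fresh column list scanned twice with min and max for
-- every column index) by a single row-major sweep keeping per-column running minima and
-- maxima (objective: alternative decomposition, same asymptotic cost).

-- ===== PORT A =====
def TARGET_DIFF_VALUE : Int := 75

-- Literal port of A.  ds[j][i] is `(ds.getD j []).getD i 0`: the defaults are reached only on
-- ragged inputs where Python raises IndexError, which Pre_evaluate_old_py excludes.
def evaluate_old_py (ds : List (List Int)) : Bool :=
  let n := ds.length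
  let diff0 : List Int := List.replicate n 0
  let diff := (List.range n).foldl (fun d i =>
    let col := (List.range n).map (fun j => (ds.getD j []).getD i 0)
    let min_curr := (PySem.List.min? col (fun y => y)).getD 0
    let max_curr := (PySem.List.max? col (fun y => y)).getD 0
    d.set i |max_curr - min_curr|) diff0
  let diff_sum := diff.sum
  decide (diff_sum ≤ TARGET_DIFF_VALUE + 3)

-- ===== PORT B =====
-- Literal port of B (Source B): running per-column min/max lists, one row-major pass; row[i]
-- is `row.getD i 0`, reached with i in range only on inputs Pre_evaluate_old_py admits.
def evaluate_old_py_alt (ds : List (List Int)) : Bool :=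
  let n := ds.length
  if n = 0 then true
  else
    let lo0 := (List.range n).map (fun i => (ds.getD 0 []).getD i 0)
    let hi0 := lo0
    let p := (List.range' 1 (n - 1)).foldl (fun (p : List Int × List Int) r =>
      let row := ds.getD r []
      (List.range n).foldl (fun (q : List Int × List Int) i =>
        (if row.getD i 0 < q.1.getD i 0 then q.1.set i (row.getD i 0) else q.1,
         if row.getD i 0 > q.2.getD i 0 then q.2.set i (row.getD i 0) else q.2)) p) (lo0, hi0)
    decide (((List.range n).map (fun i => p.2.getD i 0 - p.1.getD i 0)).sum ≤ TARGET_DIFF_VALUE + 3)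

-- ===== PRECONDITION & SPEC =====
-- Pre_ excludes exactly the ragged inputs (some row shorter than the number of rows) on which
-- the Python A raises IndexError (B raises there too).
def Pre_evaluate_old_py (ds : List (List Int)) : Prop :=
  ∀ r ∈ ds, ds.length ≤ r.length
instance (ds : List (List Int)) : Decidable (Pre_evaluate_old_py ds) := by
  unfold Pre_evaluate_old_py; infer_instance

def pvWitness_evaluate_old_py : List (List Int) := [[1, 2], [3, 4]]

def Spec_evaluate_old_py (ds : List (List Int)) (out : Bool) : Prop := out = evaluate_old_py_alt ds
instance (ds : List (List Int)) (out : Bool) : Decidable (Spec_evaluate_old_py ds out) := by unfold Spec_evaluate_old_py; infer_instance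

-- ===== CLAIM (what is proved, stated in full; the proofs are below) =====
def Claim_equal_evaluate_old_py : Prop := ∀ (ds : List (List Int)), Dom_evaluate_old_py ds → Pre_evaluate_old_py ds → Spec_evaluate_old_py ds (evaluate_old_py ds)

-- ===== LEMMAS AND PROOFS =====

-- setting every index i < n of a long-enough list to f i
theorem foldl_set_range (f : Nat → Int) :
    ∀ (n : Nat) (acc : List Int), n ≤ acc.length →
      (List.range n).foldl (fun d i => d.set i (f i)) acc
        = (List.range n).map f ++ acc.drop n := by
  intro n
  induction n with
  | zero => intro acc _; simp
  | succ m ih =>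
    intro acc h
    rw [List.range_succ, List.foldl_append, List.map_append]
    have hm : m ≤ acc.length := Nat.le_of_succ_le h
    rw [ih acc hm]
    have hlen : ((List.range m).map f).length = m := by simp
    have hdrop : acc.drop m = acc[m] :: acc.drop (m + 1) :=
      List.drop_eq_getElem_cons (by omega)
    simp only [List.foldl_cons, List.foldl_nil]
    rw [List.set_append, hlen, if_neg (lt_irrefl m), Nat.sub_self, hdrop,
        List.set_cons_zero]
    simp

-- the column list A builds is the map over the rows
theorem range_map_getD {α β : Type} (l : List α) (d : α) (g : α → β) :
    (List.range l.length).map (fun j => g (l.getD j d)) = l.map g := by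
  apply List.ext_getElem
  · simp
  · intro k h1 h2
    simp only [List.getElem_map, List.getElem_range]
    rw [List.getD_eq_getElem l d (by simpa using h1)]

-- B's inner loop updates lo and hi independently: the pair fold splits
theorem inner_pair_split (row : List Int) :
    ∀ (l : List Nat) (b c : List Int),
      l.foldl (fun (q : List Int × List Int) i =>
        (if row.getD i 0 < q.1.getD i 0 then q.1.set i (row.getD i 0) else q.1,
         if row.getD i 0 > q.2.getD i 0 then q.2.set i (row.getD i 0) else q.2)) (b, c)
        = (l.foldl (fun d i => if row.getD i 0 < d.getD i 0 then d.set i (row.getD i 0) else d) b,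
           l.foldl (fun d i => if row.getD i 0 > d.getD i 0 then d.set i (row.getD i 0) else d) c) := by
  intro l
  induction l with
  | nil => intro b c; rfl
  | cons x t ih => intro b c; simp only [List.foldl_cons, ih]

-- a fold over range n whose step rewrites only index i, described by a binary op g
theorem foldl_update_range (f : Nat → Int) (g : Int → Int → Int)
    (st : List Int → Nat → List Int)
    (hst : ∀ (d : List Int) (i : Nat), i < d.length → st d i = d.set i (g (d.getD i 0) (f i))) :
    ∀ (n : Nat) (acc : List Int), n ≤ acc.length →
      (List.range n).foldl st acc
        = (List.range n).map (fun i => g (acc.getD i 0) (f i)) ++ acc.drop n := by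
  intro n
  induction n with
  | zero => intro acc _; simp
  | succ m ih =>
    intro acc h
    rw [List.range_succ, List.foldl_append, List.map_append]
    have hm : m ≤ acc.length := Nat.le_of_succ_le h
    rw [ih acc hm]
    have hlen : ((List.range m).map (fun i => g (acc.getD i 0) (f i))).length = m := by simp
    have hlen2 : ((List.range m).map (fun i => g (acc.getD i 0) (f i)) ++ acc.drop m).length
        = acc.length := by simp; omega
    have hdrop : acc.drop m = acc[m] :: acc.drop (m + 1) :=
      List.drop_eq_getElem_cons (by omega)
    have hget : ((List.range m).map (fun i => g (acc.getD i 0) (f i)) ++ acc.drop m).getD m 0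
        = acc.getD m 0 := by
      rw [List.getD_eq_getElem _ 0 (by rw [hlen2]; omega), List.getD_eq_getElem acc 0 (by omega)]
      rw [List.getElem_append_right (by simp)]
      simp only [hlen, Nat.sub_self, hdrop, List.getElem_cons_zero]
      rfl
    simp only [List.foldl_cons, List.foldl_nil]
    rw [hst _ m (by omega), hget]
    rw [List.set_append, hlen, if_neg (lt_irrefl m), Nat.sub_self, hdrop,
        List.set_cons_zero]
    simp

theorem min_step (row : List Int) (d : List Int) (i : Nat) (h : i < d.length) :
    (if row.getD i 0 < d.getD i 0 then d.set i (row.getD i 0) else d)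
      = d.set i (min (d.getD i 0) (row.getD i 0)) := by
  split_ifs with hlt
  · rw [min_eq_right (by omega)]
  · rw [min_eq_left (by omega)]
    rw [List.getD_eq_getElem d 0 h]
    exact (List.set_getElem_self h).symm

theorem max_step (row : List Int) (d : List Int) (i : Nat) (h : i < d.length) :
    (if row.getD i 0 > d.getD i 0 then d.set i (row.getD i 0) else d)
      = d.set i (max (d.getD i 0) (row.getD i 0)) := by
  split_ifs with hlt
  · rw [max_eq_right (by omega)]
  · rw [max_eq_left (by omega)]
    rw [List.getD_eq_getElem d 0 h]
    exact (List.set_getElem_self h).symm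

-- reading rows of pre ++ l by index, starting at index |pre|, is a fold over l
theorem foldl_range'_getD {β : Type} (G : β → List Int → β) :
    ∀ (l : List (List Int)) (pre : List (List Int)) (b : β),
      (List.range' pre.length l.length).foldl (fun p r => G p ((pre ++ l).getD r [])) b
        = l.foldl G b := by
  intro l
  induction l with
  | nil => intro pre b; simp
  | cons a t ih =>
    intro pre b
    have h1 : (pre ++ a :: t).getD pre.length [] = a := by
      rw [List.getD_eq_getElem _ [] (by simp)]
      rw [List.getElem_append_right (by omega)]
      simp
    have h2 : pre ++ a :: t = (pre ++ [a]) ++ t := by simp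
    simp only [List.length_cons, List.range'_succ, List.foldl_cons, h1]
    rw [h2]
    have h3 : (pre ++ [a]).length = pre.length + 1 := by simp
    have h4 := ih (pre ++ [a]) (G b a)
    rw [h3] at h4
    exact h4

-- B's whole pass, per column: running min/max folds over the rows
theorem main_pass (n : Nat) :
    ∀ (rows : List (List Int)), (∀ r ∈ rows, n ≤ r.length) →
      ∀ (lo hi : List Int), lo.length = n → hi.length = n →
        rows.foldl (fun (p : List Int × List Int) row =>
          (List.range n).foldl (fun (q : List Int × List Int) i =>
            (if row.getD i 0 < q.1.getD i 0 then q.1.set i (row.getD i 0) else q.1,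
             if row.getD i 0 > q.2.getD i 0 then q.2.set i (row.getD i 0) else q.2)) p) (lo, hi)
          = ((List.range n).map (fun i => rows.foldl (fun a r => min a (r.getD i 0)) (lo.getD i 0)),
             (List.range n).map (fun i => rows.foldl (fun a r => max a (r.getD i 0)) (hi.getD i 0))) := by
  intro rows
  induction rows with
  | nil =>
    intro _ lo hi hlo hhi
    simp only [List.foldl_nil]
    rw [Prod.mk.injEq]
    constructor <;>
    · apply List.ext_getElem
      · simp; omega
      · intro k h1 h2
        simp only [List.getElem_map, List.getElem_range]
        rw [List.getD_eq_getElem _ 0 (by omega)]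
  | cons row t ih =>
    intro hr lo hi hlo hhi
    have hrow : n ≤ row.length := hr row (by simp)
    simp only [List.foldl_cons]
    rw [inner_pair_split]
    rw [foldl_update_range (fun i => row.getD i 0) (fun a v => min a v) _
          (min_step row) n lo (by omega),
        foldl_update_range (fun i => row.getD i 0) (fun a v => max a v) _
          (max_step row) n hi (by omega)]
    rw [List.drop_eq_nil_of_le (by omega), List.drop_eq_nil_of_le (by omega),
        List.append_nil, List.append_nil]
    rw [ih (fun x hx => hr x (by simp [hx])) _ _ (by simp) (by simp)]
    rw [Prod.mk.injEq]
    have hpoint : ∀ (acc : List Int) (op : Int → Int → Int), acc.length = n → ∀ i, i < n →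
        ((List.range n).map (fun i => op (acc.getD i 0) (row.getD i 0))).getD i 0
          = op (acc.getD i 0) (row.getD i 0) := by
      intro acc op hacc i hi
      rw [List.getD_eq_getElem _ 0 (by simp [hi])]
      simp
    constructor <;>
    · apply List.map_congr_left
      intro i hi
      have hin : i < n := List.mem_range.mp hi
      congr 1
      exact hpoint _ _ (by omega) i hin

theorem foldl_min_le_foldl_max (i : Nat) :
    ∀ (rows : List (List Int)) (x y : Int), x ≤ y →
      rows.foldl (fun a r => min a (r.getD i 0)) x ≤ rows.foldl (fun a r => max a (r.getD i 0)) y := by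
  intro rows
  induction rows with
  | nil => intro x y h; simpa using h
  | cons r t ih =>
    intro x y h
    simp only [List.foldl_cons]
    exact ih _ _ (le_trans (min_le_left _ _) (le_trans h (le_max_left _ _)))

-- ===== VERDICT (by name: the statement is the Claim_ definition above) =====
theorem evaluate_old_py_spec : Claim_equal_evaluate_old_py := by
  intro ds _ hpre
  unfold Spec_evaluate_old_py
  match ds with
  | [] => rfl
  | r0 :: rest =>
    unfold evaluate_old_py evaluate_old_py_alt
    simp only []
    set n := (r0 :: rest).length with hn
    rw [if_neg (by simp [hn])]
    have hr0 : n ≤ r0.length := hpre r0 (by simp)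
    have hrest : ∀ r ∈ rest, n ≤ r.length := fun r hr => hpre r (by simp [hr])
    -- B side: the outer loop is a fold over rest, then per-column running folds
    have hlen0 : ((List.range n).map (fun i => ((r0 :: rest).getD 0 []).getD i 0)).length = n := by
      simp
    have houter : (List.range' 1 (n - 1)).foldl (fun (p : List Int × List Int) r =>
        (List.range n).foldl (fun (q : List Int × List Int) i =>
          (if ((r0 :: rest).getD r []).getD i 0 < q.1.getD i 0 then
              q.1.set i (((r0 :: rest).getD r []).getD i 0) else q.1,
           if ((r0 :: rest).getD r []).getD i 0 > q.2.getD i 0 then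
              q.2.set i (((r0 :: rest).getD r []).getD i 0) else q.2)) p)
        ((List.range n).map (fun i => ((r0 :: rest).getD 0 []).getD i 0),
         (List.range n).map (fun i => ((r0 :: rest).getD 0 []).getD i 0))
        = rest.foldl (fun (p : List Int × List Int) row =>
            (List.range n).foldl (fun (q : List Int × List Int) i =>
              (if row.getD i 0 < q.1.getD i 0 then q.1.set i (row.getD i 0) else q.1,
               if row.getD i 0 > q.2.getD i 0 then q.2.set i (row.getD i 0) else q.2)) p)
            ((List.range n).map (fun i => ((r0 :: rest).getD 0 []).getD i 0),
             (List.range n).map (fun i => ((r0 :: rest).getD 0 []).getD i 0)) := by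
      have : n - 1 = rest.length := by simp [hn]
      rw [this]
      exact foldl_range'_getD (fun (p : List Int × List Int) row =>
        (List.range n).foldl (fun (q : List Int × List Int) i =>
          (if row.getD i 0 < q.1.getD i 0 then q.1.set i (row.getD i 0) else q.1,
           if row.getD i 0 > q.2.getD i 0 then q.2.set i (row.getD i 0) else q.2)) p) rest [r0] _
    rw [houter, main_pass n rest hrest _ _ hlen0 hlen0]
    -- A side: the diff list is a map over the columns
    rw [foldl_set_range _ n (List.replicate n 0) (by simp)]
    rw [List.drop_replicate]
    simp only [Nat.sub_self, List.replicate_zero, List.append_nil]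
    have hcol : ∀ i : Nat,
        (List.range n).map (fun j => ((r0 :: rest).getD j []).getD i 0)
          = (r0 :: rest).map (fun r => r.getD i 0) := fun i =>
      range_map_getD (r0 :: rest) [] (fun r => r.getD i 0)
    apply congrArg (fun s : Int => decide (s ≤ TARGET_DIFF_VALUE + 3))
    apply congrArg List.sum
    apply List.map_congr_left
    intro i hi
    have hin : i < n := List.mem_range.mp hi
    rw [hcol i]
    simp only [List.map_cons, PySem.List.min?_id_cons, PySem.List.max?_id_cons, Option.getD_some]
    rw [List.foldl_map, List.foldl_map]
    have hinit : ((List.range n).map (fun i => ((r0 :: rest).getD 0 []).getD i 0)).getD i 0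
        = r0.getD i 0 := by
      rw [List.getD_eq_getElem _ 0 (by simp [hin])]
      simp
    have hmapmin : ((List.range n).map (fun i => rest.foldl (fun a r => min a (r.getD i 0))
          (((List.range n).map (fun i => ((r0 :: rest).getD 0 []).getD i 0)).getD i 0))).getD i 0
        = rest.foldl (fun a r => min a (r.getD i 0)) (r0.getD i 0) := by
      rw [List.getD_eq_getElem _ 0 (by simp [hin])]
      simp only [List.getElem_map, List.getElem_range]
      rw [hinit]
    have hmapmax : ((List.range n).map (fun i => rest.foldl (fun a r => max a (r.getD i 0))
          (((List.range n).map (fun i => ((r0 :: rest).getD 0 []).getD i 0)).getD i 0))).getD i 0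
        = rest.foldl (fun a r => max a (r.getD i 0)) (r0.getD i 0) := by
      rw [List.getD_eq_getElem _ 0 (by simp [hin])]
      simp only [List.getElem_map, List.getElem_range]
      rw [hinit]
    rw [hmapmin, hmapmax]
    have hle : rest.foldl (fun a r => min a (r.getD i 0)) (r0.getD i 0)
        ≤ rest.foldl (fun a r => max a (r.getD i 0)) (r0.getD i 0) :=
      foldl_min_le_foldl_max i rest _ _ le_rfl
    rw [abs_of_nonneg (by omega)]
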